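-- pv_equiv track=rewrite | github.com/RKolen/DDCCS | src/stories/story_updater.py | _filter_template_text
-- ===== SOURCE A (Python) =====
-- def _filter_template_text(content: str) -> str:
--     """Remove template guidance, keep only story content.
--
--     Strips template sections and guidance keywords that should not appear
--     in finalized story narratives. Also removes trailing separators and
--     excessive blank lines.
--
--     Args:
--         content: Story content that may include template text
--
--     Returns:
--         Content with template text removed
--     """
--     lines = content.split("\n")
--     kept_lines = []
--     skip_until_next_section = False
--
--     template_sections = [
--         "Scene Title",
--         "Story Content",
--         "Character Development",
--         "DC Suggestions",
--         "Combat Summary",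
--         "Story Narrative (Final)",
--     ]
--
--     template_keywords = [
--         "[Add",
--         "[Paste",
--         "[Clean",
--         "[Include",
--         "[Write your narrative",
--         "Write pure narrative",
--         "Focus on:",
--         "Character actions and dialogue",
--         "Environmental descriptions",
--         "Plot developments",
--         "NPC interactions",
--         "Example narrative",
--         "For character",
--         "For DC",
--         "- CHARACTER/",
--         "- Personality trait",
--         "- Relationship developments",
--         "- Major plot",
--         "- Character consistency",
--         "`character_development",
--         "`story_dc_suggestions",
--     ]
--
--     for line in lines:
--         # Detect start of template section
--         if line.startswith("## "):
--             is_template = any(x in line for x in template_sections)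
--             if is_template:
--                 skip_until_next_section = True
--                 continue
--
--             skip_until_next_section = False
--             kept_lines.append(line)
--         # Skip template content while in template section
--         elif skip_until_next_section:
--             if line.startswith("## "):
--                 skip_until_next_section = False
--                 kept_lines.append(line)
--             continue
--         # Skip lines containing template keywords
--         elif any(keyword in line for keyword in template_keywords):
--             continue
--         # Keep narrative content
--         else:
--             kept_lines.append(line)
--
--     # Post-process: remove trailing separators and clean up blank lines
--     result = "\n".join(kept_lines).strip()
--
--     # Remove trailing separator lines
--     while result.endswith("\n---"):
--         result = result[:-4].rstrip()
--
--     # Clean up excessive consecutive blank lines (keep max 2)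
--     while "\n\n\n" in result:
--         result = result.replace("\n\n\n", "\n\n")
--
--     return result
-- ===== SOURCE B (Python) =====
-- TEMPLATE_SECTIONS = [
--     "Scene Title",
--     "Story Content",
--     "Character Development",
--     "DC Suggestions",
--     "Combat Summary",
--     "Story Narrative (Final)",
-- ]
--
-- TEMPLATE_KEYWORDS = [
--     "[Add",
--     "[Paste",
--     "[Clean",
--     "[Include",
--     "[Write your narrative",
--     "Write pure narrative",
--     "Focus on:",
--     "Character actions and dialogue",
--     "Environmental descriptions",
--     "Plot developments",
--     "NPC interactions",
--     "Example narrative",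
--     "For character",
--     "For DC",
--     "- CHARACTER/",
--     "- Personality trait",
--     "- Relationship developments",
--     "- Major plot",
--     "- Character consistency",
--     "`character_development",
--     "`story_dc_suggestions",
-- ]
--
--
-- def _is_header(line):
--     return line.startswith("## ")
--
--
-- def _is_template_header(line):
--     return any(x in line for x in TEMPLATE_SECTIONS)
--
--
-- def _has_keyword(line):
--     return any(k in line for k in TEMPLATE_KEYWORDS)
--
--
-- def _sections(lines):
--     """Group lines into (header-or-None, body) pairs; the first pair has header None."""
--     header, body = None, []
--     for line in lines:
--         if _is_header(line):
--             yield header, body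
--             header, body = line, []
--         else:
--             body.append(line)
--     yield header, body
--
--
-- def _render(header, body):
--     """Lines a section contributes: template sections vanish, kept bodies lose keyword lines."""
--     if header is not None and _is_template_header(header):
--         return []
--     narrative = [l for l in body if not _has_keyword(l)]
--     return narrative if header is None else [header] + narrative
--
--
-- def _filter_template_text(content: str) -> str:
--     """Remove template guidance, keep only story content (section-group version)."""
--     kept = []
--     for header, body in _sections(content.split("\n")):
--         kept.extend(_render(header, body))
--
--     text = "\n".join(kept).strip()
--     while text.endswith("\n---"):
--         text = text[:-4].rstrip()
--
--     # Cap runs of consecutive newlines at two (the fixpoint of collapsing triple newlines).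
--     out, run = [], 0
--     for ch in text:
--         run = run + 1 if ch == "\n" else 0
--         if ch != "\n" or run <= 2:
--             out.append(ch)
--     return "".join(out)
-- ===== Notes on version B (the rewrite author's own statement) =====
-- stated objective: alternative
-- what changed: Replaces A's single stateful line loop (skip-until-next-section flag) by a section-grouping pass that renders each (header, body) group independently, and replaces A's repeated whole-string replace loop for collapsing excessive blank lines by a single pass that caps consecutive-newline runs at two (the fixpoint of that loop).
import Mathlib
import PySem

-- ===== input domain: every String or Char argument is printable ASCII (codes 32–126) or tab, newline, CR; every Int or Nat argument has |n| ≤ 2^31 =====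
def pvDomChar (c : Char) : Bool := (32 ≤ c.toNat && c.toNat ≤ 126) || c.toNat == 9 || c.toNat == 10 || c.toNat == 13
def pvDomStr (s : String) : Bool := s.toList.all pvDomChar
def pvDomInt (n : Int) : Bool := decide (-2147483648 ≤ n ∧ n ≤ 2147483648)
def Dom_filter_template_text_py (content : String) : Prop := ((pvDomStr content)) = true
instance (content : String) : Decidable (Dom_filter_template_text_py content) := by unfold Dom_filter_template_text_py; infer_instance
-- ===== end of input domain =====

-- B replaces A's stateful skip-flag loop by rendering (header, body) section groups, and A's
-- repeated replace loop for excessive blank lines by a one-pass cap of newline runs at two.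

-- ===== PORT A =====
-- A's in-function constant lists
def tSectionsA : List (List Char) :=
  ["Scene Title".toList, "Story Content".toList, "Character Development".toList,
   "DC Suggestions".toList, "Combat Summary".toList, "Story Narrative (Final)".toList]

def tKeywordsA : List (List Char) :=
  ["[Add".toList, "[Paste".toList, "[Clean".toList, "[Include".toList,
   "[Write your narrative".toList, "Write pure narrative".toList, "Focus on:".toList,
   "Character actions and dialogue".toList, "Environmental descriptions".toList,
   "Plot developments".toList, "NPC interactions".toList, "Example narrative".toList,
   "For character".toList, "For DC".toList, "- CHARACTER/".toList,
   "- Personality trait".toList, "- Relationship developments".toList,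
   "- Major plot".toList, "- Character consistency".toList,
   "`character_development".toList, "`story_dc_suggestions".toList]

-- A's loop body: state = (kept_lines, skip_until_next_section), one line at a time
def filterA_step (st : List (List Char) × Bool) (line : List Char) : List (List Char) × Bool :=
  if PySem.Chars.startswith line "## ".toList then
    if tSectionsA.any (fun x => PySem.Chars.isIn x line) then (st.1, true)
    else (st.1 ++ [line], false)
  else if st.2 then
    -- A's (dead) inner check, transcribed as written
    if PySem.Chars.startswith line "## ".toList then (st.1 ++ [line], false) else st
  else if tKeywordsA.any (fun k => PySem.Chars.isIn k line) then st
  else (st.1 ++ [line], st.2)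

-- termination facts for A's two post-processing while-loops (cited by name in decreasing_by)
lemma replaceGo_len_le (old new : List Char) (hle : new.length ≤ old.length) :
    ∀ (fuel : Nat) (l acc : List Char),
      (PySem.Chars.replace.go old new fuel l acc).length ≤ acc.length + l.length := by
  intro fuel
  induction fuel with
  | zero => intro l acc; simp [PySem.Chars.replace.go]
  | succ fuel ih =>
    intro l acc
    match l with
    | [] => simp [PySem.Chars.replace.go]
    | c :: t =>
      rw [PySem.Chars.replace.go]
      by_cases hp : old.isPrefixOf (c :: t) = true
      · simp only [hp, if_pos]
        have hol : old.length ≤ (c :: t).length :=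
          ((List.isPrefixOf_iff_prefix).mp hp).length_le
        have := ih (List.drop old.length (c :: t)) (new.reverse ++ acc)
        simp only [List.length_append, List.length_reverse, List.length_drop,
          List.length_cons] at this hol ⊢
        omega
      · simp only [hp, if_neg, Bool.false_eq_true, not_false_iff]
        have := ih t (c :: acc)
        simp only [List.length_cons] at this ⊢
        omega

lemma replaceGo_len_lt (old new : List Char) (hne : old ≠ []) (hlt : new.length < old.length) :
    ∀ (fuel : Nat) (l acc : List Char), old <:+: l → l.length ≤ fuel →
      (PySem.Chars.replace.go old new fuel l acc).length < acc.length + l.length := by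
  intro fuel
  induction fuel with
  | zero =>
    intro l acc hinf hlen
    have : old.length ≤ l.length := hinf.length_le
    have : old.length = 0 := by omega
    exact absurd (List.length_eq_zero_iff.mp this) hne
  | succ fuel ih =>
    intro l acc hinf hlen
    match l with
    | [] =>
      have : old.length ≤ (0:Nat) := by simpa using hinf.length_le
      exact absurd (List.length_eq_zero_iff.mp (by omega)) hne
    | c :: t =>
      rw [PySem.Chars.replace.go]
      by_cases hp : old.isPrefixOf (c :: t) = true
      · simp only [hp, if_pos]
        have hol : old.length ≤ (c :: t).length :=
          ((List.isPrefixOf_iff_prefix).mp hp).length_le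
        have := replaceGo_len_le old new (le_of_lt hlt) fuel
          (List.drop old.length (c :: t)) (new.reverse ++ acc)
        have hone : 1 ≤ old.length := by
          cases old with | nil => exact absurd rfl hne | cons _ _ => simp
        simp only [List.length_append, List.length_reverse, List.length_drop,
          List.length_cons] at this hol ⊢
        omega
      · simp only [hp, if_neg, Bool.false_eq_true, not_false_iff]
        have hinft : old <:+: t := by
          rcases (List.infix_cons_iff).mp hinf with hpre | hinft
          · exact absurd ((List.isPrefixOf_iff_prefix).mpr hpre) hp
          · exact hinft
        have := ih t (c :: acc) hinft (by simpa using Nat.lt_succ_iff.mp (by simpa using hlen))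
        simp only [List.length_cons] at this ⊢
        omega

lemma replace_len_lt (r : List Char) (h : "\n\n\n".toList <:+: r) :
    (PySem.Chars.replace r "\n\n\n".toList "\n\n".toList).length < r.length := by
  rw [PySem.Chars.replace]
  simp only [List.isEmpty_iff]
  rw [if_neg (by decide)]
  simpa using replaceGo_len_lt "\n\n\n".toList "\n\n".toList (by decide) (by decide)
    r.length r [] h (le_refl _)

-- while result.endswith("\n---"): result = result[:-4].rstrip()
def trimSepA (r : List Char) : List Char :=
  if h : PySem.Chars.endswith r "\n---".toList = true then
    trimSepA (PySem.Chars.rstrip (PySem.List.slice r none (some (-4))))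
  else r
termination_by r.length
decreasing_by
  · have hsuf : "\n---".toList <:+ r := by
      simpa [PySem.Chars.endswith, List.isSuffixOf_iff_suffix] using h
    have hlen : 4 ≤ r.length := by simpa using hsuf.length_le
    have hsl : (PySem.List.slice r none (some (-4)) : List Char).length = r.length - 4 := by
      simp [PySem.List.slice, PySem.List.clampIdx]
      split_ifs <;> omega
    have hr : (PySem.Chars.rstrip (PySem.List.slice r none (some (-4)))).length
        ≤ (PySem.List.slice r none (some (-4))).length := by
      simp only [PySem.Chars.rstrip, List.length_reverse]
      exact (List.length_dropWhile_le _ _).trans (by simp)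
    omega

-- while "\n\n\n" in result: result = result.replace("\n\n\n", "\n\n")
def collapseA (r : List Char) : List Char :=
  if h2 : PySem.Chars.isIn "\n\n\n".toList r = true then
    collapseA (PySem.Chars.replace r "\n\n\n".toList "\n\n".toList)
  else r
termination_by r.length
decreasing_by
  · exact replace_len_lt r ((PySem.Chars.isIn_iff_infix _ _).mp h2)

def filter_template_text_py (content : String) : String :=
  let kept := ((PySem.Chars.splitOn content.toList ['\n']).foldl filterA_step ([], false)).1
  String.ofList (collapseA (trimSepA (PySem.Chars.strip (PySem.Chars.join ['\n'] kept))))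

-- ===== PORT B =====
-- Source B's module-level constants
def sectionNamesB : List (List Char) :=
  ["Scene Title".toList, "Story Content".toList, "Character Development".toList,
   "DC Suggestions".toList, "Combat Summary".toList, "Story Narrative (Final)".toList]

def keywordsB : List (List Char) :=
  ["[Add".toList, "[Paste".toList, "[Clean".toList, "[Include".toList,
   "[Write your narrative".toList, "Write pure narrative".toList, "Focus on:".toList,
   "Character actions and dialogue".toList, "Environmental descriptions".toList,
   "Plot developments".toList, "NPC interactions".toList, "Example narrative".toList,
   "For character".toList, "For DC".toList, "- CHARACTER/".toList,
   "- Personality trait".toList, "- Relationship developments".toList,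
   "- Major plot".toList, "- Character consistency".toList,
   "`character_development".toList, "`story_dc_suggestions".toList]

def isHeaderB (line : List Char) : Bool := PySem.Chars.startswith line "## ".toList
def isTemplateB (line : List Char) : Bool := sectionNamesB.any (fun x => PySem.Chars.isIn x line)
def hasKwB (line : List Char) : Bool := keywordsB.any (fun k => PySem.Chars.isIn k line)

-- _sections: group the lines into (header-or-None, body) pairs
def sectionsB : List (List Char) → Option (List Char) → List (List Char) →
    List (Option (List Char) × List (List Char))
  | [], h, b => [(h, b)]
  | line :: rest, h, b =>
    if isHeaderB line then (h, b) :: sectionsB rest (some line) []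
    else sectionsB rest h (b ++ [line])

-- _render: the lines one section contributes
def renderB : Option (List Char) × List (List Char) → List (List Char)
  | (h, b) =>
    if h.any isTemplateB then []
    else
      let narrative := b.filter (fun l => !(hasKwB l))
      match h with
      | none => narrative
      | some hd => hd :: narrative

-- the trailing-separator while-loop (same code as in Source A)
def trimSepB (r : List Char) : List Char :=
  if h : PySem.Chars.endswith r "\n---".toList = true then
    trimSepB (PySem.Chars.rstrip (PySem.List.slice r none (some (-4))))
  else r
termination_by r.length
decreasing_by
  · have hsuf : "\n---".toList <:+ r := by
      simpa [PySem.Chars.endswith, List.isSuffixOf_iff_suffix] using h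
    have hlen : 4 ≤ r.length := by simpa using hsuf.length_le
    have hsl : (PySem.List.slice r none (some (-4)) : List Char).length = r.length - 4 := by
      simp [PySem.List.slice, PySem.List.clampIdx]
      split_ifs <;> omega
    have hr : (PySem.Chars.rstrip (PySem.List.slice r none (some (-4)))).length
        ≤ (PySem.List.slice r none (some (-4))).length := by
      simp only [PySem.Chars.rstrip, List.length_reverse]
      exact (List.length_dropWhile_le _ _).trans (by simp)
    omega

-- the one-pass newline-run cap: run = run+1 on a newline else 0; keep unless a newline with run > 2
def capNlB (run : Nat) : List Char → List Char
  | [] => []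
  | c :: t =>
    if c = '\n' then
      if run + 1 ≤ 2 then c :: capNlB (run + 1) t else capNlB (run + 1) t
    else c :: capNlB 0 t

def filter_template_text_py_alt (content : String) : String :=
  let kept := (sectionsB (PySem.Chars.splitOn content.toList ['\n']) none []).flatMap renderB
  String.ofList (capNlB 0 (trimSepB (PySem.Chars.strip (PySem.Chars.join ['\n'] kept))))

-- ===== PRECONDITION & SPEC =====
def Spec_filter_template_text_py (content : String) (out : String) : Prop := out = filter_template_text_py_alt content
instance (content : String) (out : String) : Decidable (Spec_filter_template_text_py content out) := by unfold Spec_filter_template_text_py; infer_instance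

-- ===== CLAIM (what is proved, stated in full; the proofs are below) =====
def Claim_equal_filter_template_text_py : Prop := ∀ (content : String), Dom_filter_template_text_py content → Spec_filter_template_text_py content (filter_template_text_py content)

-- ===== LEMMAS AND PROOFS =====

-- A's inline predicates are B's named ones (the literal lists coincide)
lemma headA_eq (line : List Char) :
    PySem.Chars.startswith line "## ".toList = isHeaderB line := rfl
lemma tempA_eq (line : List Char) :
    tSectionsA.any (fun x => PySem.Chars.isIn x line) = isTemplateB line := rfl
lemma kwA_eq (line : List Char) :
    tKeywordsA.any (fun k => PySem.Chars.isIn k line) = hasKwB line := rfl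

lemma renderB_none (b : List (List Char)) :
    renderB (none, b) = b.filter (fun l => !(hasKwB l)) := by
  simp [renderB]

lemma renderB_some_of_not_template (hd : List Char) (b : List (List Char))
    (h : isTemplateB hd = false) :
    renderB (some hd, b) = hd :: b.filter (fun l => !(hasKwB l)) := by
  simp [renderB, h]

lemma renderB_some_of_template (hd : List Char) (b : List (List Char))
    (h : isTemplateB hd = true) : renderB (some hd, b) = [] := by
  simp [renderB, h]

-- appending a body line to an open kept section = keyword-filtering it on the way out
lemma renderB_snoc (h : Option (List Char)) (b : List (List Char)) (line : List Char)
    (hh : h = none ∨ ∃ hd, h = some hd ∧ isTemplateB hd = false) :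
    renderB (h, b ++ [line])
      = renderB (h, b) ++ (if hasKwB line then [] else [line]) := by
  rcases hh with rfl | ⟨hd, rfl, ht⟩
  · simp [renderB_none, List.filter_append]
    by_cases hk : hasKwB line = true <;> simp [hk]
  · simp [renderB_some_of_not_template _ _ ht, List.filter_append]
    by_cases hk : hasKwB line = true <;> simp [hk]

-- the core invariant: A's stateful fold against B's section grouping
lemma foldA_sectionsB (lines : List (List Char)) :
    (∀ (K : List (List Char)) (b : List (List Char)) (h : Option (List Char)),
        (h = none ∨ ∃ hd, h = some hd ∧ isTemplateB hd = false) →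
        (lines.foldl filterA_step (K ++ renderB (h, b), false)).1
          = K ++ (sectionsB lines h b).flatMap renderB) ∧
    (∀ (K : List (List Char)) (hd : List Char) (b : List (List Char)),
        isTemplateB hd = true →
        (lines.foldl filterA_step (K, true)).1
          = K ++ (sectionsB lines (some hd) b).flatMap renderB) := by
  induction lines with
  | nil =>
    constructor
    · intro K b h _; simp [sectionsB]
    · intro K hd b ht; simp [sectionsB, renderB_some_of_template _ _ ht]
  | cons line rest ih =>
    constructor
    · intro K b h hh
      by_cases hH : isHeaderB line = true
      · by_cases hT : isTemplateB line = true
        · have := ih.2 (K ++ renderB (h, b)) line [] hT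
          simp only [List.foldl_cons, filterA_step, headA_eq, tempA_eq, hH, hT, if_pos,
            sectionsB, List.flatMap_cons] at this ⊢
          rw [this]; simp
        · rw [Bool.not_eq_true] at hT
          have := ih.1 (K ++ renderB (h, b)) [] (some line) (Or.inr ⟨line, rfl, hT⟩)
          rw [renderB_some_of_not_template _ _ hT] at this
          simp only [List.foldl_cons, filterA_step, headA_eq, tempA_eq, hH, hT,
            Bool.false_eq_true, if_pos, if_false, sectionsB, List.flatMap_cons] at this ⊢
          simp only [List.filter_nil] at this
          rw [this]
          simp [renderB_some_of_not_template _ _ hT]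
      · have hstep : filterA_step (K ++ renderB (h, b), false) line
            = (K ++ renderB (h, b ++ [line]), false) := by
          simp only [filterA_step, headA_eq, kwA_eq, hH, Bool.false_eq_true, if_neg,
            not_false_iff]
          rw [renderB_snoc h b line hh]
          by_cases hk : hasKwB line = true <;> simp [hk, List.append_assoc]
        have := ih.1 K (b ++ [line]) h hh
        simp only [List.foldl_cons, hstep, sectionsB, hH, Bool.false_eq_true, if_neg,
          not_false_iff] at this ⊢
        exact this
    · intro K hd b ht
      by_cases hH : isHeaderB line = true
      · by_cases hT : isTemplateB line = true
        · have := ih.2 K line [] hT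
          simp only [List.foldl_cons, filterA_step, headA_eq, tempA_eq, hH, hT, if_pos,
            sectionsB, List.flatMap_cons, renderB_some_of_template _ _ ht] at this ⊢
          rw [this]; simp
        · rw [Bool.not_eq_true] at hT
          have := ih.1 K [] (some line) (Or.inr ⟨line, rfl, hT⟩)
          rw [renderB_some_of_not_template _ _ hT] at this
          simp only [List.filter_nil] at this
          simp only [List.foldl_cons, filterA_step, headA_eq, tempA_eq, hH, hT,
            Bool.false_eq_true, if_pos, if_false, sectionsB, List.flatMap_cons,
            renderB_some_of_template _ _ ht] at this ⊢
          rw [this]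
          simp [renderB_some_of_not_template _ _ hT]
      · have := ih.2 K hd (b ++ [line]) ht
        simp only [List.foldl_cons, filterA_step, headA_eq, hH, Bool.false_eq_true, if_neg,
          not_false_iff, if_pos, sectionsB, renderB_some_of_template _ _ ht] at this ⊢
        rw [this]

-- the two identically-written trailing-separator loops agree
lemma trimSep_eq (r : List Char) : trimSepA r = trimSepB r := by
  induction r using trimSepA.induct with
  | case1 r h ih => rw [trimSepA, trimSepB, dif_pos h, dif_pos h]; exact ih
  | case2 r h => rw [trimSepA, trimSepB, dif_neg h, dif_neg h]

-- capNlB only sees the run count through min run 2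
lemma capNlB_ge2 (x : List Char) : ∀ (j k : Nat), 2 ≤ j → 2 ≤ k → capNlB j x = capNlB k x := by
  induction x with
  | nil => intro j k _ _; rfl
  | cons c t ih =>
    intro j k hj hk
    by_cases hc : c = '\n'
    · simp only [capNlB, hc, if_pos]
      rw [if_neg (by omega), if_neg (by omega)]
      exact ih (j + 1) (k + 1) (by omega) (by omega)
    · simp [capNlB, hc]

-- one triple-to-double newline rewrite is invisible to the cap
lemma capNlB_nl32 (x : List Char) (k : Nat) :
    capNlB k ('\n' :: '\n' :: '\n' :: x) = capNlB k ('\n' :: '\n' :: x) := by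
  match k with
  | 0 =>
    show '\n' :: '\n' :: capNlB 3 x = '\n' :: '\n' :: capNlB 2 x
    rw [capNlB_ge2 x 3 2 (by norm_num) (by norm_num)]
  | 1 =>
    show '\n' :: capNlB 4 x = '\n' :: capNlB 3 x
    rw [capNlB_ge2 x 4 3 (by norm_num) (by norm_num)]
  | (n + 2) =>
    have h3 : ¬(n + 2 + 1 ≤ 2) := by omega
    have h4 : ¬(n + 2 + 1 + 1 ≤ 2) := by omega
    have h5 : ¬(n + 2 + 1 + 1 + 1 ≤ 2) := by omega
    simp only [capNlB, if_pos rfl, if_neg h3, if_neg h4, if_neg h5]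
    exact capNlB_ge2 x (n + 2 + 1 + 1 + 1) (n + 2 + 1 + 1) (by omega) (by omega)

lemma capNlB_append_congr (x y : List Char) (hxy : ∀ k, capNlB k x = capNlB k y) :
    ∀ (p : List Char) (k : Nat), capNlB k (p ++ x) = capNlB k (p ++ y) := by
  intro p
  induction p with
  | nil => intro k; exact hxy k
  | cons c t ih =>
    intro k
    by_cases hc : c = '\n'
    · simp only [List.cons_append, capNlB, hc, if_pos]
      by_cases h2 : k + 1 ≤ 2
      · rw [if_pos h2, if_pos h2, ih (k + 1)]
      · rw [if_neg h2, if_neg h2]; exact ih (k + 1)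
    · simp only [List.cons_append, capNlB, hc, if_neg, ite_false]
      rw [ih 0]

-- the cap of one whole replace pass
lemma cap_replaceGo : ∀ (fuel : Nat) (l acc : List Char),
    capNlB 0 (PySem.Chars.replace.go "\n\n\n".toList "\n\n".toList fuel l acc)
      = capNlB 0 (acc.reverse ++ l) := by
  intro fuel
  induction fuel with
  | zero => intro l acc; rw [PySem.Chars.replace.go]
  | succ fuel ih =>
    intro l acc
    match l with
    | [] =>
      rw [PySem.Chars.replace.go]
      · simp
      · omega
    | c :: t =>
      rw [PySem.Chars.replace.go]
      by_cases hp : ("\n\n\n".toList).isPrefixOf (c :: t) = true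
      · simp only [hp, if_pos]
        obtain ⟨rest, hrest⟩ := (List.isPrefixOf_iff_prefix).mp hp
        have hdrop : List.drop ("\n\n\n".toList).length (c :: t) = rest := by
          rw [← hrest]; simp
        rw [hdrop, ih]
        have h32 : ∀ k, capNlB k ("\n\n".toList ++ rest) = capNlB k ("\n\n\n".toList ++ rest) := by
          intro k; exact (capNlB_nl32 rest k).symm
        calc capNlB 0 (("\n\n".toList.reverse ++ acc).reverse ++ rest)
            = capNlB 0 (acc.reverse ++ ("\n\n".toList ++ rest)) := by simp
          _ = capNlB 0 (acc.reverse ++ ("\n\n\n".toList ++ rest)) :=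
              capNlB_append_congr _ _ h32 acc.reverse 0
          _ = capNlB 0 (acc.reverse ++ (c :: t)) := by rw [hrest]
      · simp only [hp, if_neg, Bool.false_eq_true, not_false_iff]
        rw [ih]
        simp
lemma cap_replace (r : List Char) :
    capNlB 0 (PySem.Chars.replace r "\n\n\n".toList "\n\n".toList) = capNlB 0 r := by
  rw [PySem.Chars.replace]
  rw [if_neg (by decide)]
  simpa using cap_replaceGo r.length r []

-- a string with no triple newline is a fixpoint of the cap
lemma capNlB_fix : ∀ (r : List Char) (k : Nat),
    ¬ ("\n\n\n".toList <:+: (List.replicate (min k 2) '\n' ++ r)) → capNlB k r = r := by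
  intro r
  induction r with
  | nil => intro k _; rfl
  | cons c t ih =>
    intro k hk
    by_cases hc : c = '\n'
    · subst hc
      by_cases h2 : k + 1 ≤ 2
      · have hmin : min k 2 = k := by omega
        have hmin' : min (k + 1) 2 = k + 1 := by omega
        have hshift : List.replicate (min k 2) '\n' ++ '\n' :: t
            = List.replicate (min (k + 1) 2) '\n' ++ t := by
          rw [hmin, hmin', List.replicate_succ']; simp
        simp only [capNlB, if_pos rfl, if_pos h2]
        rw [ih (k + 1) (by rw [← hshift]; exact hk)]
        simp
      · exfalso
        apply hk
        have hmin : min k 2 = 2 := by omega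
        rw [hmin]
        have h3 : "\n\n\n".toList = ['\n', '\n', '\n'] := rfl
        exact ⟨[], t, by rw [h3]; rfl⟩
    · simp only [capNlB, hc, if_neg, ite_false]
      rw [ih 0]
      intro hinf
      exact hk (hinf.trans (((List.suffix_cons c t).isInfix).trans
        (List.suffix_append _ _).isInfix))

-- A's collapse loop computes the cap
lemma collapseA_cap (r : List Char) : collapseA r = capNlB 0 r := by
  induction r using collapseA.induct with
  | case1 r h ih =>
    rw [collapseA]; simp only [h, dif_pos]
    rw [ih, cap_replace]
  | case2 r h =>
    rw [collapseA]; simp only [h, dif_neg]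
    have : ¬ ("\n\n\n".toList <:+: r) := by
      simpa using (PySem.Chars.isIn_eq_false_iff _ _).mp (Bool.not_eq_true _ ▸ (by simpa using h))
    exact ((capNlB_fix r 0) (by simpa using this)).symm

-- the kept lines coincide
lemma kept_eq (lines : List (List Char)) :
    (lines.foldl filterA_step ([], false)).1
      = (sectionsB lines none []).flatMap renderB := by
  have := (foldA_sectionsB lines).1 [] [] none (Or.inl rfl)
  simpa [renderB_none] using this

-- ===== VERDICT (by name: the statement is the Claim_ definition above) =====
theorem filter_template_text_py_spec : Claim_equal_filter_template_text_py := by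
  intro content _
  unfold Spec_filter_template_text_py filter_template_text_py filter_template_text_py_alt
  simp only [kept_eq, trimSep_eq, collapseA_cap]
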